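-- pv_equiv track=rewrite | github.com/mehulghosal/LeadZeppelin | midiInterpreter/parseMidi.py | calcOctave
-- ===== SOURCE A (Python) =====
-- def calcOctave(noteName):
-- 	#60 = C4
-- 	#notes are from 0-127
-- 	#midi can somehow play a C(-1), below C0. Do not be alarmed
-- 	octave = -1
-- 	while True:
-- 		if noteName - 12 >= 0:
-- 			noteName -= 12
-- 			octave += 1
-- 		else:
-- 			break
-- 	return (noteName, octave)
-- ===== SOURCE B (Python) =====
-- def calcOctave(noteName):
--     # closed form: q full twelves removed (never going below zero), octave = q - 1
--     q = max(noteName // 12, 0)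
--     return (noteName - 12 * q, q - 1)
-- ===== Notes on version B (the rewrite author's own statement) =====
-- stated objective: simpler
-- what changed: Replaced the repeated-subtraction while loop with a closed-form computation: q = max(noteName // 12, 0) twelves are removed at once, giving (noteName - 12*q, q - 1).
import Mathlib
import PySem

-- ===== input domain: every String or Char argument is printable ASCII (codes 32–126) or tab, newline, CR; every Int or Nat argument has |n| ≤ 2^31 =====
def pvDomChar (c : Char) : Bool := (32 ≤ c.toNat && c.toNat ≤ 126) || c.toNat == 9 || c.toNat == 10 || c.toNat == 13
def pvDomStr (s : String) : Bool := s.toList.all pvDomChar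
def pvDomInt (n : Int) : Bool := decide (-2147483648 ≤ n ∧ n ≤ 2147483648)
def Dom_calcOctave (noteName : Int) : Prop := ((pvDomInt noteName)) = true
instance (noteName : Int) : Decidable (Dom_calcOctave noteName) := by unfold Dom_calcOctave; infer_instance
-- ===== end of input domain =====

-- B replaces A's repeated-subtraction loop with a closed-form max(floordiv,0) computation (simpler, O(1)).


-- ===== PORT A =====
-- the 'while True' loop: subtract 12 while noteName - 12 >= 0, incrementing octave
def calcOctaveLoop (noteName octave : Int) : Int × Int :=
  if noteName - 12 ≥ 0 then calcOctaveLoop (noteName - 12) (octave + 1)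
  else (noteName, octave)
termination_by noteName.toNat
decreasing_by omega

def calcOctave (noteName : Int) : Int × Int :=
  calcOctaveLoop noteName (-1)

-- ===== PORT B =====
def calcOctave_alt (noteName : Int) : Int × Int :=
  let q := max (PySem.Int.floordiv noteName 12) 0
  (noteName - 12 * q, q - 1)

-- ===== PRECONDITION & SPEC =====
def Spec_calcOctave (noteName : Int) (out : Int × Int) : Prop := out = calcOctave_alt noteName
instance (noteName : Int) (out : Int × Int) : Decidable (Spec_calcOctave noteName out) := by unfold Spec_calcOctave; infer_instance

-- ===== CLAIM (what is proved, stated in full; the proofs are below) =====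
def Claim_equal_calcOctave : Prop := ∀ (noteName : Int), Dom_calcOctave noteName → Spec_calcOctave noteName (calcOctave noteName)

-- ===== LEMMAS AND PROOFS =====
-- loop invariant: the loop removes max(n / 12, 0) twelves, adding that count to the octave accumulator
theorem calcOctaveLoop_eq (noteName octave : Int) :
    calcOctaveLoop noteName octave =
      (noteName - 12 * max (noteName / 12) 0, octave + max (noteName / 12) 0) := by
  induction noteName, octave using calcOctaveLoop.induct with
  | case1 n oct h ih =>
      rw [calcOctaveLoop, if_pos h, ih]
      have h12 : (n - 12) / 12 = n / 12 - 1 := by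
        omega
      have hpos : 1 ≤ n / 12 := by omega
      rw [h12]
      have : max (n / 12 - 1) 0 = n / 12 - 1 := by omega
      rw [this]
      have : max (n / 12) 0 = n / 12 := by omega
      rw [this]
      exact Prod.ext (by ring) (by ring)
  | case2 n oct h =>
      rw [calcOctaveLoop, if_neg h]
      have : max (n / 12) 0 = 0 := by omega
      rw [this]
      simp

-- ===== VERDICT (by name: the statement is the Claim_ definition above) =====
theorem calcOctave_spec : Claim_equal_calcOctave := by
  intro n _
  unfold Spec_calcOctave calcOctave calcOctave_alt
  rw [calcOctaveLoop_eq]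
  rw [PySem.Int.floordiv_eq_ediv_of_pos (by norm_num)]
  simp
  ring_nf
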